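-- pv_equiv track=rewrite | github.com/alestar/InterviewPrep | src/MyPython/PastInterview/CodeSignal/LongestDiagonalSegmentInMatrix.py | solution
-- ===== SOURCE A (Python) =====
-- def solution(matrix):
--     if not matrix or not matrix[0]:
--         return 0
--
--     rows, cols = len(matrix), len(matrix[0])
--     max_length = 0
--     directions = [(-1, -1), (-1, 1), (1, -1), (1, 1)]  # 4 diagonal directions
--
--     def expected(length):
--         if length == 0:
--             return 1
--         elif length % 2 == 1:
--             return 2
--         else:
--             return 0
--
--     for r in range(rows):
--         for c in range(cols):
--             if matrix[r][c] != 1:  # must start with 1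
--                 continue
--             for dr, dc in directions:
--                 x, y = r, c
--                 length = 0
--                 last_x, last_y = r, c
--
--                 while 0 <= x < rows and 0 <= y < cols:
--                     if matrix[x][y] != expected(length):
--                         break
--                     length += 1
--                     last_x, last_y = x, y
--                     x += dr
--                     y += dc
--
--                 # Only count if last valid cell is at a border
--                 if last_x == 0 or last_x == rows-1 or last_y == 0 or last_y == cols-1:
--                     max_length = max(max_length, length)
--
--     return max_length
-- ===== SOURCE B (Python) =====
-- def solution(matrix):
--     if not matrix or not matrix[0]:
--         return 0
--     R, C = len(matrix), len(matrix[0])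
--     best = 0
--     for dr, dc in ((-1, -1), (-1, 1), (1, -1), (1, 1)):
--         # rolling dynamic programming per direction: prevg[c] / prevh[c] are the
--         # lengths of the alternating 2,0,... / 0,2,... runs starting at (r+dr, c)
--         order = range(R - 1, -1, -1) if dr == 1 else range(R)
--         prevg = [0] * C
--         prevh = [0] * C
--         for r in order:
--             row = matrix[r]
--             curg = []
--             curh = []
--             for c in range(C):
--                 v = row[c]
--                 nc = c + dc
--                 pg = prevg[nc] if 0 <= nc < C else 0
--                 ph = prevh[nc] if 0 <= nc < C else 0
--                 curg.append(1 + ph if v == 2 else 0)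
--                 curh.append(1 + pg if v == 0 else 0)
--                 if v == 1:
--                     L = 1 + pg
--                     ex, ey = r + (L - 1) * dr, c + (L - 1) * dc
--                     if ex == 0 or ex == R - 1 or ey == 0 or ey == C - 1:
--                         best = max(best, L)
--             prevg, prevh = curg, curh
--     return best
-- ===== Notes on version B (the rewrite author's own statement) =====
-- stated objective: alternative
-- what changed: Replaces A's per-start diagonal walks (tracking the last visited cell) with a per-direction rolling dynamic programme that computes alternating-run lengths row by row and derives the segment endpoint arithmetically from the run length.
import Mathlib
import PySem

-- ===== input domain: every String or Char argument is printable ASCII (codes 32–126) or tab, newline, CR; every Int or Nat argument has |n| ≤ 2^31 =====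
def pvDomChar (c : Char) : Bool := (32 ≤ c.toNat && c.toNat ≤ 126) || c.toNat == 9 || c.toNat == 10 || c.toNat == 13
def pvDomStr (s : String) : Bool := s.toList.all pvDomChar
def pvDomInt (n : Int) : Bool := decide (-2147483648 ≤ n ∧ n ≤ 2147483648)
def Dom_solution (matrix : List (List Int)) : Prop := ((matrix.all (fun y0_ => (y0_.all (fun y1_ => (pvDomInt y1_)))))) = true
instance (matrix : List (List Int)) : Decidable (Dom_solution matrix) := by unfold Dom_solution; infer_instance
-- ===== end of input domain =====

-- B replaces A's per-start diagonal walks with a per-direction rolling DP over rows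
-- (alternating-run lengths), deriving the segment endpoint arithmetically (objective: alternative).

-- ===== PORT A =====
-- matrix[x][y] (exact whenever 0 ≤ x < len matrix and 0 ≤ y < len (matrix[x]))
def mgetA (matrix : List (List Int)) (x y : Int) : Int :=
  PySem.List.pyGetD (PySem.List.pyGetD matrix x []) y 0

def expectedA (len : Int) : Int :=
  if len = 0 then 1 else if PySem.Int.mod len 2 = 1 then 2 else 0

-- the inner while loop of A; fuel (rows+1) is enough since x moves by ±1 inside [0, rows)
def loopA (matrix : List (List Int)) (rows cols dr dc : Int) :
    Nat → Int → Int → Int → Int → Int → Int × Int × Int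
  | 0, _, _, len, lx, ly => (len, lx, ly)
  | Nat.succ f, x, y, len, lx, ly =>
    if 0 ≤ x ∧ x < rows ∧ 0 ≤ y ∧ y < cols then
      if mgetA matrix x y ≠ expectedA len then (len, lx, ly)
      else loopA matrix rows cols dr dc f (x + dr) (y + dc) (len + 1) x y
    else (len, lx, ly)

def solution (matrix : List (List Int)) : Int :=
  if matrix = [] ∨ matrix.headI = [] then 0
  else
    let rows : Int := matrix.length
    let cols : Int := matrix.headI.length
    let directions : List (Int × Int) := [(-1, -1), (-1, 1), (1, -1), (1, 1)]
    (PySem.List.pyRange 0 rows 1).foldl (fun best r =>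
      (PySem.List.pyRange 0 cols 1).foldl (fun best c =>
        if mgetA matrix r c ≠ 1 then best
        else directions.foldl (fun best d =>
          let res := loopA matrix rows cols d.1 d.2 (rows.toNat + 1) r c 0 r c
          if res.2.1 = 0 ∨ res.2.1 = rows - 1 ∨ res.2.2 = 0 ∨ res.2.2 = cols - 1 then
            max best res.1
          else best) best) best) 0

-- ===== PORT B =====
-- curg.append(1 + ph if v == 2 else 0)
def gval (C dc : Int) (row prevh : List Int) (c : Int) : Int :=
  if PySem.List.pyGetD row c 0 = 2 then
    1 + (if 0 ≤ c + dc ∧ c + dc < C then PySem.List.pyGetD prevh (c + dc) 0 else 0)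
  else 0

-- curh.append(1 + pg if v == 0 else 0)
def hval (C dc : Int) (row prevg : List Int) (c : Int) : Int :=
  if PySem.List.pyGetD row c 0 = 0 then
    1 + (if 0 ≤ c + dc ∧ c + dc < C then PySem.List.pyGetD prevg (c + dc) 0 else 0)
  else 0

-- body of `for c in range(C)`: state = (curg, curh, best)
def stepC (R C r dr dc : Int) (row prevg prevh : List Int)
    (st : List Int × List Int × Int) (c : Int) : List Int × List Int × Int :=
  let v := PySem.List.pyGetD row c 0
  let pg := if 0 ≤ c + dc ∧ c + dc < C then PySem.List.pyGetD prevg (c + dc) 0 else 0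
  let b :=
    if v = 1 then
      let L := 1 + pg
      if r + (L - 1) * dr = 0 ∨ r + (L - 1) * dr = R - 1 ∨
         c + (L - 1) * dc = 0 ∨ c + (L - 1) * dc = C - 1 then max st.2.2 L
      else st.2.2
    else st.2.2
  (st.1 ++ [gval C dc row prevh c], st.2.1 ++ [hval C dc row prevg c], b)

-- body of `for r in order`: state = (prevg, prevh, best)
def stepR (matrix : List (List Int)) (R C dr dc : Int)
    (st : List Int × List Int × Int) (r : Int) : List Int × List Int × Int :=
  let row := PySem.List.pyGetD matrix r []
  (PySem.List.pyRange 0 C 1).foldl (stepC R C r dr dc row st.1 st.2.1) ([], [], st.2.2)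

def solution_alt (matrix : List (List Int)) : Int :=
  if matrix = [] ∨ matrix.headI = [] then 0
  else
    let R : Int := matrix.length
    let C : Int := matrix.headI.length
    ([(-1, -1), (-1, 1), (1, -1), (1, 1)] : List (Int × Int)).foldl (fun best d =>
      let ord := if d.1 = 1 then PySem.List.pyRange (R - 1) (-1) (-1)
                 else PySem.List.pyRange 0 R 1
      (ord.foldl (stepR matrix R C d.1 d.2)
        (List.replicate C.toNat 0, List.replicate C.toNat 0, best)).2.2) 0

-- ===== PRECONDITION & SPEC =====
-- A raises IndexError exactly when some row is shorter than the first row (its cell scan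
-- touches every column index below len(matrix[0])); Pre_ excludes exactly those inputs.
def Pre_solution (matrix : List (List Int)) : Prop :=
  ∀ row ∈ matrix, matrix.headI.length ≤ row.length
instance (matrix : List (List Int)) : Decidable (Pre_solution matrix) := by
  unfold Pre_solution; infer_instance

def pvWitness_solution : List (List Int) := [[1, 2], [2, 0]]

def Spec_solution (matrix : List (List Int)) (out : Int) : Prop := out = solution_alt matrix
instance (matrix : List (List Int)) (out : Int) : Decidable (Spec_solution matrix out) := by
  unfold Spec_solution; infer_instance

-- ===== CLAIM (what is proved, stated in full; the proofs are below) =====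
def Claim_equal_solution : Prop :=
  ∀ (matrix : List (List Int)), Dom_solution matrix → Pre_solution matrix →
    Spec_solution matrix (solution matrix)

-- ===== LEMMAS AND PROOFS =====

-- maximum of f over a list, floored at 0
def S {α : Type} (l : List α) (f : α → Int) : Int :=
  l.foldr (fun x a => max (f x) a) 0

theorem S_nil {α : Type} (f : α → Int) : S [] f = 0 := rfl

theorem S_cons {α : Type} (x : α) (l : List α) (f : α → Int) :
    S (x :: l) f = max (f x) (S l f) := rfl

theorem S_nonneg {α : Type} (l : List α) (f : α → Int) : 0 ≤ S l f := by
  induction l with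
  | nil => simp [S]
  | cons x l ih => rw [S_cons] at *; omega

theorem S_congr {α : Type} {l : List α} {f g : α → Int}
    (h : ∀ x ∈ l, f x = g x) : S l f = S l g := by
  induction l with
  | nil => rfl
  | cons x l ih =>
    rw [S_cons, S_cons, h x (by simp), ih (fun y hy => h y (by simp [hy]))]

theorem S_const0 {α : Type} (l : List α) : S l (fun _ => (0 : Int)) = 0 := by
  induction l with
  | nil => rfl
  | cons x l ih => rw [S_cons, ih]; omega

theorem S_append {α : Type} (l1 l2 : List α) (f : α → Int) :
    S (l1 ++ l2) f = max (S l1 f) (S l2 f) := by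
  induction l1 with
  | nil => simp [S_nil]; have := S_nonneg l2 f; omega
  | cons x l ih => simp only [List.cons_append, S_cons, ih]; omega

theorem S_reverse {α : Type} (l : List α) (f : α → Int) : S l.reverse f = S l f := by
  induction l with
  | nil => rfl
  | cons x l ih =>
    simp only [List.reverse_cons, S_append, S_cons, ih, S_nil]
    have := S_nonneg l f; omega

theorem S_max {α : Type} (l : List α) (f g : α → Int) :
    S l (fun x => max (f x) (g x)) = max (S l f) (S l g) := by
  induction l with
  | nil => rfl
  | cons x l ih => simp only [S_cons, ih]; omega

theorem S_comm {α β : Type} (l : List α) (k : List β) (f : α → β → Int) :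
    S l (fun a => S k (fun b => f a b)) = S k (fun b => S l (fun a => f a b)) := by
  induction l with
  | nil => rw [S_nil]; rw [show (fun b => S ([] : List α) (fun a => f a b)) = fun _ => (0:Int) from rfl, S_const0]
  | cons x l ih =>
    rw [S_cons, ih, ← S_max]
    exact S_congr (fun b _ => (S_cons x l (fun a => f a b)).symm)

-- a foldl that only ever does `acc := max acc (candidate)` computes max init (S l u)
theorem foldl_max_generic {α : Type} (step : Int → α → Int) (u : α → Int) :
    ∀ (l : List α) (a : Int), 0 ≤ a →
      (∀ b x, x ∈ l → 0 ≤ b → step b x = max b (u x)) →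
      l.foldl step a = max a (S l u) := by
  intro l
  induction l with
  | nil => intro a ha _; simp [S_nil]; omega
  | cons x l ih =>
    intro a ha hstep
    rw [List.foldl_cons, hstep a x (by simp) ha,
      ih (max a (u x)) (by omega) (fun b y hy hb => hstep b y (by simp [hy]) hb), S_cons]
    omega

-- length of the alternating (want, 2-want, …) diagonal run starting at (x,y)
def runD (m : List (List Int)) (R C : Int) (down right : Bool) (want x y : Int) : Int :=
  if h : 0 ≤ x ∧ x < R ∧ 0 ≤ y ∧ y < C ∧ mgetA m x y = want then
    1 + runD m R C down right (2 - want) (x + (if down then 1 else -1))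
          (y + (if right then 1 else -1))
  else 0
termination_by (if down then R - x else x + 1).toNat
decreasing_by cases down <;> simp_all

theorem runD_nonneg (m : List (List Int)) (R C : Int) (down right : Bool)
    (want x y : Int) : 0 ≤ runD m R C down right want x y := by
  fun_induction runD with
  | case1 want x y h ih => simp only [dite_eq_ite] at *; omega
  | case2 => simp

theorem expectedA_flip (len : Int) (h : 1 ≤ len) :
    expectedA (len + 1) = 2 - expectedA len := by
  unfold expectedA
  rw [PySem.Int.mod_eq_emod_of_pos (by omega), PySem.Int.mod_eq_emod_of_pos (by omega)]
  split_ifs <;> omega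

theorem loopA_char (matrix : List (List Int)) (R C : Int) (d : Int × Int)
    (hdr : (if ((d.1 == 1 : Bool)) then (1 : Int) else -1) = d.1)
    (hdc : (if ((d.2 == 1 : Bool)) then (1 : Int) else -1) = d.2) :
    ∀ (f : Nat) (x y len lx ly : Int), 1 ≤ len →
      ((if (d.1 == 1 : Bool) then R - x else x + 1).toNat < f) →
      loopA matrix R C d.1 d.2 f x y len lx ly =
        (len + runD matrix R C (d.1 == 1) (d.2 == 1) (expectedA len) x y,
         if runD matrix R C (d.1 == 1) (d.2 == 1) (expectedA len) x y = 0 then (lx, ly)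
         else (x + (runD matrix R C (d.1 == 1) (d.2 == 1) (expectedA len) x y - 1) * d.1,
               y + (runD matrix R C (d.1 == 1) (d.2 == 1) (expectedA len) x y - 1) * d.2)) := by
  intro f
  induction f with
  | zero => intro x y len lx ly _ hf; omega
  | succ f ih =>
    intro x y len lx ly hlen hf
    simp only [loopA]
    by_cases hin : 0 ≤ x ∧ x < R ∧ 0 ≤ y ∧ y < C
    · rw [if_pos hin]
      by_cases hm : mgetA matrix x y = expectedA len
      · rw [if_neg (by simp [hm])]
        have hd1 : d.1 = 1 ∨ d.1 = -1 := by
          cases hb : (d.1 == 1 : Bool) <;> simp at hdr <;> omega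
        have hmeas : ((if (d.1 == 1 : Bool) then R - (x + d.1) else (x + d.1) + 1).toNat < f) := by
          rcases hd1 with hd | hd <;> simp [hd] at hf ⊢ <;> omega
        rw [ih (x + d.1) (y + d.2) (len + 1) x y (by omega) hmeas, expectedA_flip len hlen]
        have hrw : runD matrix R C (d.1 == 1) (d.2 == 1) (expectedA len) x y =
            1 + runD matrix R C (d.1 == 1) (d.2 == 1) (2 - expectedA len) (x + d.1) (y + d.2) := by
          rw [runD, dif_pos ⟨hin.1, hin.2.1, hin.2.2.1, hin.2.2.2, hm⟩, hdr, hdc]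
        rw [hrw]
        have hk : 0 ≤ runD matrix R C (d.1 == 1) (d.2 == 1) (2 - expectedA len) (x + d.1) (y + d.2) :=
          runD_nonneg _ _ _ _ _ _ _ _
        set k := runD matrix R C (d.1 == 1) (d.2 == 1) (2 - expectedA len) (x + d.1) (y + d.2) with hkdef
        by_cases hk0 : k = 0
        · simp only [hk0, if_pos]
          norm_num
        · rw [if_neg hk0, if_neg (by omega)]
          have h1 : len + 1 + k = len + (1 + k) := by omega
          have h2 : x + d.1 + (k - 1) * d.1 = x + (1 + k - 1) * d.1 := by ring_nf
          have h3 : y + d.2 + (k - 1) * d.2 = y + (1 + k - 1) * d.2 := by ring_nf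
          rw [h1, h2, h3]
      · rw [if_pos (by simp [hm])]
        have h0 : runD matrix R C (d.1 == 1) (d.2 == 1) (expectedA len) x y = 0 := by
          rw [runD, dif_neg]; intro hh; exact hm hh.2.2.2.2
        rw [h0]; norm_num
    · rw [if_neg hin]
      have h0 : runD matrix R C (d.1 == 1) (d.2 == 1) (expectedA len) x y = 0 := by
        rw [runD, dif_neg]; intro hh; exact hin ⟨hh.1, hh.2.1, hh.2.2.1, hh.2.2.2.1⟩
      rw [h0]; norm_num

theorem startA (matrix : List (List Int)) (R C : Int) (d : Int × Int)
    (hdr : (if ((d.1 == 1 : Bool)) then (1 : Int) else -1) = d.1)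
    (hdc : (if ((d.2 == 1 : Bool)) then (1 : Int) else -1) = d.2)
    (r c : Int) (hr : 0 ≤ r ∧ r < R) (hc : 0 ≤ c ∧ c < C)
    (h1 : mgetA matrix r c = 1) :
    loopA matrix R C d.1 d.2 (R.toNat + 1) r c 0 r c =
      (1 + runD matrix R C (d.1 == 1) (d.2 == 1) 2 (r + d.1) (c + d.2),
       (r + (runD matrix R C (d.1 == 1) (d.2 == 1) 2 (r + d.1) (c + d.2)) * d.1,
        c + (runD matrix R C (d.1 == 1) (d.2 == 1) 2 (r + d.1) (c + d.2)) * d.2)) := by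
  have hR1 : 1 ≤ R := by omega
  simp only [loopA]
  rw [if_pos ⟨hr.1, hr.2, hc.1, hc.2⟩]
  have he0 : expectedA 0 = 1 := by decide
  rw [if_neg (by simp [h1, he0])]
  have hd1 : d.1 = 1 ∨ d.1 = -1 := by
    cases hb : (d.1 == 1 : Bool) <;> simp at hdr <;> omega
  have hmeas : ((if (d.1 == 1 : Bool) then R - (r + d.1) else (r + d.1) + 1).toNat < R.toNat) := by
    rcases hd1 with hd | hd <;> simp [hd] <;> omega
  simp only [zero_add]
  rw [loopA_char matrix R C d hdr hdc R.toNat (r + d.1) (c + d.2) 1 r c (by omega) hmeas]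
  have he1 : expectedA 1 = 2 := by decide
  rw [he1]
  have hk : 0 ≤ runD matrix R C (d.1 == 1) (d.2 == 1) 2 (r + d.1) (c + d.2) :=
    runD_nonneg _ _ _ _ _ _ _ _
  set k := runD matrix R C (d.1 == 1) (d.2 == 1) 2 (r + d.1) (c + d.2) with hkdef
  by_cases hk0 : k = 0
  · simp only [hk0, if_pos]
    norm_num
  · rw [if_neg hk0]
    have h2 : r + d.1 + (k - 1) * d.1 = r + k * d.1 := by ring_nf
    have h3 : c + d.2 + (k - 1) * d.2 = c + k * d.2 := by ring_nf
    rw [h2, h3]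

-- the candidate value contributed by start cell (r,c) and direction d
def wFun (m : List (List Int)) (R C : Int) (d : Int × Int) (r c : Int) : Int :=
  let L := 1 + runD m R C (d.1 == 1) (d.2 == 1) 2 (r + d.1) (c + d.2)
  if mgetA m r c = 1 ∧ (r + (L - 1) * d.1 = 0 ∨ r + (L - 1) * d.1 = R - 1 ∨
      c + (L - 1) * d.2 = 0 ∨ c + (L - 1) * d.2 = C - 1) then L else 0

theorem cellA (matrix : List (List Int)) (R C : Int) (r c : Int)
    (hr : 0 ≤ r ∧ r < R) (hc : 0 ≤ c ∧ c < C) (b : Int) (hb : 0 ≤ b) :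
    (if mgetA matrix r c ≠ 1 then b
     else ([(-1, -1), (-1, 1), (1, -1), (1, 1)] : List (Int × Int)).foldl (fun best d =>
       let res := loopA matrix R C d.1 d.2 (R.toNat + 1) r c 0 r c
       if res.2.1 = 0 ∨ res.2.1 = R - 1 ∨ res.2.2 = 0 ∨ res.2.2 = C - 1 then max best res.1
       else best) b)
    = max b (S ([(-1, -1), (-1, 1), (1, -1), (1, 1)] : List (Int × Int))
        (fun d => wFun matrix R C d r c)) := by
  by_cases hm : mgetA matrix r c = 1
  · rw [if_neg (by simp [hm])]
    rw [foldl_max_generic _ (fun d => wFun matrix R C d r c) _ b hb ?hstep]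
    case hstep =>
      intro b' d hd hb'
      have hdr : (if (d.1 == 1 : Bool) then (1 : Int) else -1) = d.1 := by
        fin_cases hd <;> decide
      have hdc : (if (d.2 == 1 : Bool) then (1 : Int) else -1) = d.2 := by
        fin_cases hd <;> decide
      show (let res := loopA matrix R C d.1 d.2 (R.toNat + 1) r c 0 r c
            if res.2.1 = 0 ∨ res.2.1 = R - 1 ∨ res.2.2 = 0 ∨ res.2.2 = C - 1 then max b' res.1
            else b') = max b' (wFun matrix R C d r c)
      rw [startA matrix R C d hdr hdc r c hr hc hm]
      have hknn : 0 ≤ runD matrix R C (d.1 == 1) (d.2 == 1) 2 (r + d.1) (c + d.2) :=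
        runD_nonneg _ _ _ _ _ _ _ _
      simp only [wFun, hm, true_and]
      set k := runD matrix R C (d.1 == 1) (d.2 == 1) 2 (r + d.1) (c + d.2) with hkd
      have h11 : 1 + k - 1 = k := by omega
      rw [h11]
      split_ifs <;> omega
  · rw [if_pos (by simp [hm])]
    have hz : S ([(-1, -1), (-1, 1), (1, -1), (1, 1)] : List (Int × Int))
        (fun d => wFun matrix R C d r c) = 0 := by
      rw [S_congr (g := fun _ => (0 : Int)) (fun d _ => by simp [wFun, hm]), S_const0]
    rw [hz]; omega

theorem colsA (matrix : List (List Int)) (R C : Int) (r : Int)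
    (hr : 0 ≤ r ∧ r < R) (b : Int) (hb : 0 ≤ b) :
    (PySem.List.pyRange 0 C 1).foldl (fun best c =>
      if mgetA matrix r c ≠ 1 then best
      else ([(-1, -1), (-1, 1), (1, -1), (1, 1)] : List (Int × Int)).foldl (fun best d =>
        let res := loopA matrix R C d.1 d.2 (R.toNat + 1) r c 0 r c
        if res.2.1 = 0 ∨ res.2.1 = R - 1 ∨ res.2.2 = 0 ∨ res.2.2 = C - 1 then max best res.1
        else best) best) b
    = max b (S (PySem.List.pyRange 0 C 1) (fun c =>
        S ([(-1, -1), (-1, 1), (1, -1), (1, 1)] : List (Int × Int))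
          (fun d => wFun matrix R C d r c))) := by
  rw [foldl_max_generic _ _ _ b hb ?hstep]
  case hstep =>
    intro b' c hcmem hb'
    have hc : 0 ≤ c ∧ c < C := by
      simpa [PySem.List.mem_pyRange_one] using hcmem
    exact cellA matrix R C r c hr hc b' hb'

theorem A_char (matrix : List (List Int)) (h : ¬(matrix = [] ∨ matrix.headI = [])) :
    solution matrix =
      max 0 (S (PySem.List.pyRange 0 (matrix.length : Int) 1) (fun r =>
        S (PySem.List.pyRange 0 (matrix.headI.length : Int) 1) (fun c =>
          S ([(-1, -1), (-1, 1), (1, -1), (1, 1)] : List (Int × Int)) (fun d =>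
            wFun matrix (matrix.length : Int) (matrix.headI.length : Int) d r c)))) := by
  unfold solution
  rw [if_neg h]
  rw [foldl_max_generic _ _ _ 0 le_rfl ?hstep]
  case hstep =>
    intro b r hrmem hb
    have hr : 0 ≤ r ∧ r < (matrix.length : Int) := by
      simpa [PySem.List.mem_pyRange_one] using hrmem
    exact colsA matrix (matrix.length : Int) (matrix.headI.length : Int) r hr b hb

-- the DP row of run lengths for row r (expecting `want`)
def rowGH (m : List (List Int)) (R C : Int) (down right : Bool) (want r : Int) : List Int :=
  (PySem.List.pyRange 0 C 1).map (fun c => runD m R C down right want r c)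

theorem rowGH_lookup (m : List (List Int)) (R C : Int) (down right : Bool) (want r i : Int) :
    (if 0 ≤ i ∧ i < C then PySem.List.pyGetD (rowGH m R C down right want r) i 0 else 0)
      = runD m R C down right want r i := by
  by_cases hi : 0 ≤ i ∧ i < C
  · rw [if_pos hi]
    exact PySem.List.pyGetD_map_pyRange_of_nonneg _ C i 0 hi.1 hi.2
  · rw [if_neg hi, runD, dif_neg]
    intro hh; exact hi ⟨hh.2.2.1, hh.2.2.2.1⟩

theorem rowGH_out (m : List (List Int)) (R C : Int) (down right : Bool) (want r : Int)
    (hout : ¬(0 ≤ r ∧ r < R)) : rowGH m R C down right want r = List.replicate C.toNat 0 := by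
  unfold rowGH
  rw [List.map_congr_left (g := fun _ => (0 : Int))
    (fun c _ => by rw [runD, dif_neg]; intro hh; exact hout ⟨hh.1, hh.2.1⟩)]
  rw [List.map_const']
  simp [PySem.List.length_pyRange_one]

-- the best-candidate contributed at column c of row r (direction (dr,dc))
def cFun (R C r dr dc : Int) (row prevg : List Int) (c : Int) : Int :=
  let pg := if 0 ≤ c + dc ∧ c + dc < C then PySem.List.pyGetD prevg (c + dc) 0 else 0
  if PySem.List.pyGetD row c 0 = 1 ∧
      (r + (1 + pg - 1) * dr = 0 ∨ r + (1 + pg - 1) * dr = R - 1 ∨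
       c + (1 + pg - 1) * dc = 0 ∨ c + (1 + pg - 1) * dc = C - 1) then 1 + pg
  else 0

theorem stepC_eq (R C r dr dc : Int) (row prevg prevh : List Int)
    (st : List Int × List Int × Int) (c : Int) (hb : 0 ≤ st.2.2) :
    stepC R C r dr dc row prevg prevh st c =
      (st.1 ++ [gval C dc row prevh c], st.2.1 ++ [hval C dc row prevg c],
       max st.2.2 (cFun R C r dr dc row prevg c)) := by
  simp only [stepC, cFun, Prod.mk.injEq]
  refine ⟨by trivial, by trivial, ?_⟩
  split_ifs <;> omega

theorem foldC (R C r dr dc : Int) (row prevg prevh : List Int) :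
    ∀ (cs : List Int) (g0 h0 : List Int) (b : Int), 0 ≤ b →
      cs.foldl (stepC R C r dr dc row prevg prevh) (g0, h0, b) =
        (g0 ++ cs.map (gval C dc row prevh), h0 ++ cs.map (hval C dc row prevg),
         max b (S cs (cFun R C r dr dc row prevg))) := by
  intro cs
  induction cs with
  | nil => intro g0 h0 b hb; simp [S_nil, Prod.mk.injEq]; omega
  | cons c cs ih =>
    intro g0 h0 b hb
    rw [List.foldl_cons, stepC_eq R C r dr dc row prevg prevh (g0, h0, b) c hb,
      ih _ _ _ (le_trans hb (le_max_left _ _))]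
    simp only [List.append_assoc, List.singleton_append, List.map_cons, S_cons,
      Prod.mk.injEq]
    exact ⟨by trivial, by trivial, max_assoc b _ _⟩

theorem stepR_char (matrix : List (List Int)) (R C : Int) (down right : Bool)
    (dr dc : Int) (hdr : dr = if down then 1 else -1) (hdc : dc = if right then 1 else -1)
    (r : Int) (hr : 0 ≤ r ∧ r < R) (b : Int) (hb : 0 ≤ b) :
    stepR matrix R C dr dc
        (rowGH matrix R C down right 2 (r + dr), rowGH matrix R C down right 0 (r + dr), b) r =
      (rowGH matrix R C down right 2 r, rowGH matrix R C down right 0 r,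
       max b (S (PySem.List.pyRange 0 C 1) (fun c => wFun matrix R C (dr, dc) r c))) := by
  unfold stepR
  rw [foldC R C r dr dc (PySem.List.pyGetD matrix r []) _ _ (PySem.List.pyRange 0 C 1) [] [] b hb]
  have hdown : ((dr == 1) : Bool) = down := by cases down <;> rw [hdr] <;> decide
  have hright : ((dc == 1) : Bool) = right := by cases right <;> rw [hdc] <;> decide
  have hstep1 : ∀ x : Int, x + (if down then (1:Int) else -1) = x + dr := by intro x; rw [hdr]
  have hstep2 : ∀ y : Int, y + (if right then (1:Int) else -1) = y + dc := by intro y; rw [hdc]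
  refine Prod.ext ?_ (Prod.ext ?_ ?_)
  · show [] ++ (PySem.List.pyRange 0 C 1).map (gval C dc (PySem.List.pyGetD matrix r []) (rowGH matrix R C down right 0 (r + dr))) = rowGH matrix R C down right 2 r
    rw [List.nil_append]
    refine List.map_congr_left (fun c hc => ?_)
    have hcb : 0 ≤ c ∧ c < C := by simpa [PySem.List.mem_pyRange_one] using hc
    unfold gval
    rw [show ∀ y : Int, PySem.List.pyGetD (PySem.List.pyGetD matrix r []) y 0 = mgetA matrix r y from fun _ => rfl]
    rw [rowGH_lookup]
    by_cases hv : mgetA matrix r c = 2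
    · rw [if_pos hv]
      conv_rhs => rw [runD]
      rw [dif_pos ⟨hr.1, hr.2, hcb.1, hcb.2, hv⟩, hstep1, hstep2]
      norm_num
    · rw [if_neg hv]
      conv_rhs => rw [runD]
      rw [dif_neg (fun hh => hv hh.2.2.2.2)]
  · show [] ++ (PySem.List.pyRange 0 C 1).map (hval C dc (PySem.List.pyGetD matrix r []) (rowGH matrix R C down right 2 (r + dr))) = rowGH matrix R C down right 0 r
    rw [List.nil_append]
    refine List.map_congr_left (fun c hc => ?_)
    have hcb : 0 ≤ c ∧ c < C := by simpa [PySem.List.mem_pyRange_one] using hc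
    unfold hval
    rw [show ∀ y : Int, PySem.List.pyGetD (PySem.List.pyGetD matrix r []) y 0 = mgetA matrix r y from fun _ => rfl]
    rw [rowGH_lookup]
    by_cases hv : mgetA matrix r c = 0
    · rw [if_pos hv]
      conv_rhs => rw [runD]
      rw [dif_pos ⟨hr.1, hr.2, hcb.1, hcb.2, hv⟩, hstep1, hstep2]
      norm_num
    · rw [if_neg hv]
      conv_rhs => rw [runD]
      rw [dif_neg (fun hh => hv hh.2.2.2.2)]
  · show max b (S (PySem.List.pyRange 0 C 1) (cFun R C r dr dc (PySem.List.pyGetD matrix r []) (rowGH matrix R C down right 2 (r + dr)))) = max b (S (PySem.List.pyRange 0 C 1) (fun c => wFun matrix R C (dr, dc) r c))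
    congr 1
    refine S_congr (fun c hc => ?_)
    unfold cFun wFun
    simp only [rowGH_lookup, hdown, hright,
      show ∀ y : Int, PySem.List.pyGetD (PySem.List.pyGetD matrix r []) y 0 = mgetA matrix r y from fun _ => rfl]

-- rs lists rows so that each element's predecessor row (r + dr) is the previous element
def consecD (dr : Int) : Int → List Int → Prop
  | _, [] => True
  | p, r :: rs => r + dr = p ∧ consecD dr r rs

theorem consec_desc : ∀ (n : Nat) (a b : Int), (a - b).toNat = n →
    consecD 1 (a + 1) (PySem.List.pyRange a b (-1)) := by
  intro n
  induction n with
  | zero =>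
    intro a b hn
    rw [PySem.List.pyRange_neg_one_eq_nil (by omega)]
    trivial
  | succ n ih =>
    intro a b hn
    rw [PySem.List.pyRange_neg_one_cons (by omega)]
    refine ⟨rfl, ?_⟩
    have h := ih (a - 1) b (by omega)
    rwa [show a - 1 + 1 = a by omega] at h

theorem consec_asc : ∀ (n : Nat) (a b : Int), (b - a).toNat = n →
    consecD (-1) (a - 1) (PySem.List.pyRange a b 1) := by
  intro n
  induction n with
  | zero =>
    intro a b hn
    rw [PySem.List.pyRange_one_eq_nil (by omega)]
    trivial
  | succ n ih =>
    intro a b hn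
    rw [PySem.List.pyRange_one_cons (by omega)]
    refine ⟨by omega, ?_⟩
    have h := ih (a + 1) b (by omega)
    rwa [show a + 1 - 1 = a by omega] at h

theorem foldR (matrix : List (List Int)) (R C : Int) (down right : Bool)
    (dr dc : Int) (hdr : dr = if down then 1 else -1) (hdc : dc = if right then 1 else -1) :
    ∀ (rs : List Int) (p b : Int), 0 ≤ b → consecD dr p rs →
      (∀ r ∈ rs, 0 ≤ r ∧ r < R) →
      (rs.foldl (stepR matrix R C dr dc)
        (rowGH matrix R C down right 2 p, rowGH matrix R C down right 0 p, b)).2.2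
        = max b (S rs (fun r => S (PySem.List.pyRange 0 C 1)
            (fun c => wFun matrix R C (dr, dc) r c))) := by
  intro rs
  induction rs with
  | nil => intro p b hb _ _; rw [S_nil]; simp; omega
  | cons r rs ih =>
    intro p b hb hcon hmem
    rw [List.foldl_cons, ← hcon.1,
      stepR_char matrix R C down right dr dc hdr hdc r (hmem r (by simp)) b hb,
      ih r _ (le_trans hb (le_max_left _ _)) hcon.2 (fun x hx => hmem x (by simp [hx])),
      S_cons, max_assoc]

theorem dirB (matrix : List (List Int)) (R C : Int) (hR : 1 ≤ R) (down right : Bool)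
    (dr dc : Int) (hdr : dr = if down then 1 else -1) (hdc : dc = if right then 1 else -1)
    (b : Int) (hb : 0 ≤ b) :
    ((if dr = 1 then PySem.List.pyRange (R - 1) (-1) (-1) else PySem.List.pyRange 0 R 1).foldl
        (stepR matrix R C dr dc)
        (List.replicate C.toNat 0, List.replicate C.toNat 0, b)).2.2
      = max b (S (PySem.List.pyRange 0 R 1) (fun r =>
          S (PySem.List.pyRange 0 C 1) (fun c => wFun matrix R C (dr, dc) r c))) := by
  cases down with
  | true =>
    have hdr1 : dr = 1 := by rw [hdr]; rfl
    rw [if_pos hdr1,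
      show (List.replicate C.toNat 0, List.replicate C.toNat 0, b)
          = (rowGH matrix R C true right 2 R, rowGH matrix R C true right 0 R, b) from by
        rw [rowGH_out matrix R C true right 2 R (by omega),
          rowGH_out matrix R C true right 0 R (by omega)],
      foldR matrix R C true right dr dc hdr hdc _ R b hb
        (by rw [hdr1]; have := consec_desc (R - 1 + 1).toNat (R - 1) (-1) rfl
            simpa using this)
        (fun r hr => by
          have := PySem.List.mem_pyRange_neg_one.mp hr
          omega)]
    congr 1
    rw [show PySem.List.pyRange (R - 1) (-1) (-1) = (PySem.List.pyRange 0 R 1).reverse by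
      rw [PySem.List.pyRange_neg_one_eq_reverse]; norm_num]
    exact S_reverse _ _
  | false =>
    have hdr1 : dr = -1 := by rw [hdr]; rfl
    rw [if_neg (by omega),
      show (List.replicate C.toNat 0, List.replicate C.toNat 0, b)
          = (rowGH matrix R C false right 2 (-1), rowGH matrix R C false right 0 (-1), b) from by
        rw [rowGH_out matrix R C false right 2 (-1) (by omega),
          rowGH_out matrix R C false right 0 (-1) (by omega)],
      foldR matrix R C false right dr dc hdr hdc _ (-1) b hb
        (by rw [hdr1]; have := consec_asc R.toNat 0 R (by omega)
            simpa using this)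
        (fun r hr => by
          have := PySem.List.mem_pyRange_one.mp hr
          omega)]

theorem B_char (matrix : List (List Int)) (_hpre : Pre_solution matrix)
    (h : ¬(matrix = [] ∨ matrix.headI = [])) :
    solution_alt matrix =
      max 0 (S ([(-1, -1), (-1, 1), (1, -1), (1, 1)] : List (Int × Int)) (fun d =>
        S (PySem.List.pyRange 0 (matrix.length : Int) 1) (fun r =>
          S (PySem.List.pyRange 0 (matrix.headI.length : Int) 1) (fun c =>
            wFun matrix (matrix.length : Int) (matrix.headI.length : Int) d r c)))) := by
  have h0 : matrix ≠ [] := fun hh => h (Or.inl hh)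
  have hR : 1 ≤ (matrix.length : Int) := by
    have := List.length_pos_of_ne_nil h0
    omega
  unfold solution_alt
  rw [if_neg h]
  simp only [List.foldl_cons, List.foldl_nil]
  rw [dirB matrix (matrix.length : Int) (matrix.headI.length : Int) hR false false
      (-1) (-1) (by norm_num) (by norm_num) 0 le_rfl,
    dirB matrix (matrix.length : Int) (matrix.headI.length : Int) hR false true
      (-1) 1 (by norm_num) (by norm_num) _ (le_max_left 0 _),
    show (if True then PySem.List.pyRange ((matrix.length : Int) - 1) (-1) (-1)
          else PySem.List.pyRange 0 (matrix.length : Int)) =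
        (if (1 : Int) = 1 then PySem.List.pyRange ((matrix.length : Int) - 1) (-1) (-1)
          else PySem.List.pyRange 0 (matrix.length : Int)) from by norm_num,
    dirB matrix (matrix.length : Int) (matrix.headI.length : Int) hR true false
      1 (-1) (by norm_num) (by norm_num) _ (le_trans (le_max_left 0 _) (le_max_left _ _)),
    dirB matrix (matrix.length : Int) (matrix.headI.length : Int) hR true true
      1 1 (by norm_num) (by norm_num) _
      (le_trans (le_trans (le_max_left 0 _) (le_max_left _ _)) (le_max_left _ _))]
  simp only [S_cons, S_nil]
  rw [max_eq_left (S_nonneg _ _), ← max_assoc, ← max_assoc, ← max_assoc]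

-- ===== VERDICT (by name: the statement is the Claim_ definition above) =====
theorem solution_spec : Claim_equal_solution := by
  intro matrix _ hpre
  unfold Spec_solution
  by_cases h : matrix = [] ∨ matrix.headI = []
  · unfold solution solution_alt
    simp only [h, if_pos]
  · rw [A_char matrix h, B_char matrix hpre h]
    congr 1
    calc S (PySem.List.pyRange 0 (matrix.length : Int) 1) (fun r =>
            S (PySem.List.pyRange 0 (matrix.headI.length : Int) 1) (fun c =>
              S ([(-1, -1), (-1, 1), (1, -1), (1, 1)] : List (Int × Int)) (fun d =>
                wFun matrix (matrix.length : Int) (matrix.headI.length : Int) d r c)))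
        = S (PySem.List.pyRange 0 (matrix.length : Int) 1) (fun r =>
            S ([(-1, -1), (-1, 1), (1, -1), (1, 1)] : List (Int × Int)) (fun d =>
              S (PySem.List.pyRange 0 (matrix.headI.length : Int) 1) (fun c =>
                wFun matrix (matrix.length : Int) (matrix.headI.length : Int) d r c))) :=
          S_congr (fun r _ => S_comm _ _ _)
      _ = S ([(-1, -1), (-1, 1), (1, -1), (1, 1)] : List (Int × Int)) (fun d =>
            S (PySem.List.pyRange 0 (matrix.length : Int) 1) (fun r =>
              S (PySem.List.pyRange 0 (matrix.headI.length : Int) 1) (fun c =>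
                wFun matrix (matrix.length : Int) (matrix.headI.length : Int) d r c))) :=
          S_comm _ _ _
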